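-- pv_equiv track=rewrite | github.com/vvchldmsdn/algorithms | programmers/Lv3/야근지수.py | make_todo
-- ===== SOURCE A (Python) =====
-- def make_todo(l, t):
--     eq = 1
--     while eq * l <= t:
--         eq += 1
--     eq -= 1
--
--     todo = [eq] * l
--     diff = t - eq * l
--     for i in range(l - 1, l - 1 - diff, -1):
--         todo[i] += 1
--
--     return todo
-- ===== SOURCE B (Python) =====
-- def make_todo(l, t):
--     eq, diff = divmod(max(t, 0), l)
--     return [eq] * (l - diff) + [eq + 1] * diff
-- ===== Notes on version B (the rewrite author's own statement) =====
-- stated objective: simpler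
-- what changed: Replaces A's incremental while-loop search for the quotient and the per-index increment for-loop with one divmod and two list repetitions.
-- outside the precondition, e.g. on make_todo(0, -5): A returns [], B raises ZeroDivisionError
import Mathlib
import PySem

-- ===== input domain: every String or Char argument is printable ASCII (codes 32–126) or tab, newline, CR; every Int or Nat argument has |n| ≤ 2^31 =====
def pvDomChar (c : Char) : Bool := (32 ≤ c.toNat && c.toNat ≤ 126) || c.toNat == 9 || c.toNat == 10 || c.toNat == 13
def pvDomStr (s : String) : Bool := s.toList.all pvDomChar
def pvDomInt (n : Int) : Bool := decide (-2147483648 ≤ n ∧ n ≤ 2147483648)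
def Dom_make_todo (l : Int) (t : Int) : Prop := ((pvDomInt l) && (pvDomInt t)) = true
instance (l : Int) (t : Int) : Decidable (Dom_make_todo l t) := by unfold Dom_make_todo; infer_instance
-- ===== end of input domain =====

-- B replaces A's incremental quotient search plus per-index increment loop with one floor-divmod
-- and two list repetitions (objective: simpler; not measurably faster on the timed inputs).


-- ===== PORT A =====
-- the while-loop 'while eq * l <= t: eq += 1'; fuel (t.toNat + 2) exceeds the number of
-- iterations on every input admitted by Pre_ (at most max(t//l,0) + 1 ≤ t + 1 of them)
def pvLoopA (fuel : Nat) (eq l t : Int) : Int :=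
  match fuel with
  | 0 => eq
  | f + 1 => if eq * l ≤ t then pvLoopA f (eq + 1) l t else eq

def make_todo (l : Int) (t : Int) : List Int :=
  let eq := pvLoopA (t.toNat + 2) 1 l t - 1
  let todo := List.replicate l.toNat eq          -- [eq] * l
  let diff := t - eq * l
  -- for i in range(l-1, l-1-diff, -1): todo[i] += 1   (under Pre_ every i is a nonnegative
  -- in-range index, so plain Nat indexing via .toNat is exact)
  (PySem.List.pyRange (l - 1) (l - 1 - diff) (-1)).foldl
    (fun td i => td.modify i.toNat (· + 1)) todo

-- ===== PORT B =====
def make_todo_alt (l : Int) (t : Int) : List Int :=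
  let eq := PySem.Int.floordiv (max t 0) l
  let diff := PySem.Int.mod (max t 0) l
  List.replicate (l - diff).toNat eq ++ List.replicate diff.toNat (eq + 1)

-- ===== PRECONDITION & SPEC =====
-- A's while-loop diverges whenever l = 0 ∧ t ≥ 0 or l < 0 ∧ t ≥ l; Pre_ excludes those, and
-- also l = 0 ∧ t < 0 (degenerate zero slot count, where A returns [] but B divides by l and raises).
def Pre_make_todo (l : Int) (t : Int) : Prop := 0 < l ∨ (l < 0 ∧ t < l)
instance (l : Int) (t : Int) : Decidable (Pre_make_todo l t) := by unfold Pre_make_todo; infer_instance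
def pvWitness_make_todo : Int × Int := (3, 7)
def Spec_make_todo (l : Int) (t : Int) (out : List Int) : Prop := out = make_todo_alt l t
instance (l : Int) (t : Int) (out : List Int) : Decidable (Spec_make_todo l t out) := by unfold Spec_make_todo; infer_instance

-- ===== CLAIM (what is proved, stated in full; the proofs are below) =====
def Claim_equal_make_todo : Prop := ∀ (l : Int) (t : Int), Dom_make_todo l t → Pre_make_todo l t → Spec_make_todo l t (make_todo l t)

-- ===== LEMMAS AND PROOFS =====

-- the while-loop returns the least eq with eq*l > t, i.e. max(t//l,0) + 1
theorem pvLoopA_char (l t : Int) (hl : 0 < l) :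
    ∀ (fuel : Nat) (eq : Int), 1 ≤ eq → eq ≤ max (PySem.Int.floordiv t l) 0 + 1 →
      (max (PySem.Int.floordiv t l) 0 + 1 - eq).toNat ≤ fuel →
      pvLoopA fuel eq l t = max (PySem.Int.floordiv t l) 0 + 1 := by
  intro fuel
  induction fuel with
  | zero =>
    intro eq h1 h2 h3
    simp only [pvLoopA]
    omega
  | succ f ih =>
    intro eq h1 h2 h3
    simp only [pvLoopA]
    by_cases h : eq * l ≤ t
    · have hle : eq ≤ PySem.Int.floordiv t l := (PySem.Int.le_floordiv_iff_mul_le hl).mpr h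
      rw [if_pos h]
      exact ih (eq + 1) (by omega) (by omega) (by omega)
    · have hgt : ¬ eq ≤ PySem.Int.floordiv t l := fun hc =>
        h ((PySem.Int.le_floordiv_iff_mul_le hl).mp hc)
      rw [if_neg h]
      omega

-- modifying the last element of the leading replicate block
theorem modify_replicate_succ (Q : Int) (rest : List Int) :
    ∀ (n : Nat), (List.replicate (n + 1) Q ++ rest).modify n (· + 1)
      = List.replicate n Q ++ (Q + 1) :: rest := by
  intro n
  induction n with
  | zero => simp [List.modify]
  | succ m ih =>
    have : List.replicate (m + 2) Q ++ rest = Q :: (List.replicate (m + 1) Q ++ rest) := by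
      simp [List.replicate_succ]
    rw [this, List.modify_succ_cons, ih]
    simp [List.replicate_succ]

-- the countdown range splits off its last element
theorem pyRange_neg_one_snoc (a b : Int) (h : b < a) :
    PySem.List.pyRange a b (-1) = PySem.List.pyRange a (b + 1) (-1) ++ [b + 1] := by
  rw [PySem.List.pyRange_neg_one_eq_reverse, PySem.List.pyRange_neg_one_eq_reverse,
    PySem.List.pyRange_one_cons (by omega : b + 1 < a + 1)]
  simp

-- the for-loop turns the top d entries of [Q]*l into Q+1
theorem fold_incr (l : Int) (_hl : 0 < l) (Q : Int) :
    ∀ (d : Nat), (d : Int) ≤ l →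
      (PySem.List.pyRange (l - 1) (l - 1 - d) (-1)).foldl
          (fun td i => td.modify i.toNat (· + 1)) (List.replicate l.toNat Q)
        = List.replicate (l - d).toNat Q ++ List.replicate d (Q + 1) := by
  intro d
  induction d with
  | zero =>
    intro _
    rw [PySem.List.pyRange_neg_one_eq_nil (by omega)]
    simp
  | succ m ih =>
    intro hd
    have hsplit : PySem.List.pyRange (l - 1) (l - 1 - (m + 1 : Nat)) (-1)
        = PySem.List.pyRange (l - 1) (l - 1 - m) (-1) ++ [l - 1 - m] := by
      have := pyRange_neg_one_snoc (l - 1) (l - 1 - (m + 1 : Nat)) (by push_cast; omega)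
      rw [this]; congr 1 <;> [skip; (congr 1)] <;> push_cast <;> ring_nf
    rw [hsplit, List.foldl_append, ih (by omega)]
    simp only [List.foldl_cons, List.foldl_nil]
    have hm : (l - m).toNat = (l - (m + 1 : Nat)).toNat + 1 := by push_cast; omega
    have hidx : (l - 1 - m).toNat = (l - (m + 1 : Nat)).toNat := by push_cast; omega
    rw [hm, hidx, modify_replicate_succ]
    have hcons : (Q + 1) :: List.replicate m (Q + 1) = List.replicate (m + 1) (Q + 1) := rfl
    rw [hcons]

theorem make_todo_eq (l t : Int) (h : Pre_make_todo l t) : make_todo l t = make_todo_alt l t := by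
  rcases h with hl | ⟨hl, hlt⟩
  · -- l > 0
    have hQ0 : 0 ≤ max (PySem.Int.floordiv t l) 0 := le_max_right _ _
    have hfd : PySem.Int.floordiv t l = t / l := PySem.Int.floordiv_eq_ediv_of_pos hl
    have hloop : pvLoopA (t.toNat + 2) 1 l t = max (PySem.Int.floordiv t l) 0 + 1 := by
      apply pvLoopA_char l t hl _ 1 le_rfl (by omega)
      have : t / l ≤ max t 0 := by
        by_cases ht : 0 ≤ t
        · exact le_trans (Int.ediv_le_self l ht) (le_max_left _ _)
        · have : t / l ≤ 0 → t / l ≤ max t 0 := by omega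
          apply this
          have := (PySem.Int.le_floordiv_iff_mul_le (a := t) (q := 1) hl).mp
          by_contra hc
          have h1 : 1 ≤ PySem.Int.floordiv t l := by omega
          have := (PySem.Int.le_floordiv_iff_mul_le (a := t) (q := 1) hl).mp h1
          omega
      rw [hfd]; omega
    by_cases ht : 0 ≤ t
    · -- t ≥ 0
      have hmax : max t 0 = t := by omega
      have hfnn : 0 ≤ t / l := Int.ediv_nonneg ht (le_of_lt hl)
      have hQ : max (PySem.Int.floordiv t l) 0 = PySem.Int.floordiv t l := by rw [hfd]; omega
      have hmod : PySem.Int.mod t l = t % l := PySem.Int.mod_eq_emod_of_pos hl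
      have hmnn : 0 ≤ t % l := Int.emod_nonneg t (by omega)
      have hmlt : t % l < l := Int.emod_lt_of_pos t hl
      have hdiff : t - (t / l) * l = t % l := by
        have h1 : t % l + l * (t / l) = t := Int.emod_add_mul_ediv t l
        have h2 : l * (t / l) = t / l * l := mul_comm _ _
        omega
      show (PySem.List.pyRange (l - 1) (l - 1 - (t - (pvLoopA (t.toNat + 2) 1 l t - 1) * l)) (-1)).foldl
          (fun td i => td.modify i.toNat (· + 1))
          (List.replicate l.toNat (pvLoopA (t.toNat + 2) 1 l t - 1)) = _
      rw [hloop, hQ, hfd]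
      simp only [add_sub_cancel_right]
      rw [hdiff]
      have hcast : t % l = ((t % l).toNat : Int) := by omega
      rw [hcast, fold_incr l hl _ _ (by omega)]
      show _ = make_todo_alt l t
      unfold make_todo_alt
      rw [hmax, hfd, hmod]
      have hfin : (l - (((t % l).toNat : Int))).toNat = (l - t % l).toNat := by omega
      rw [hfin]
    · -- t < 0 : loop returns 1, diff = t < 0, range empty; B: quotient and remainder of 0
      have hf0 : max (PySem.Int.floordiv t l) 0 = 0 := by
        have : ¬ 1 ≤ PySem.Int.floordiv t l := fun hc =>
          absurd ((PySem.Int.le_floordiv_iff_mul_le hl).mp hc) (by omega)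
        omega
      show (PySem.List.pyRange (l - 1) (l - 1 - (t - (pvLoopA (t.toNat + 2) 1 l t - 1) * l)) (-1)).foldl
          (fun td i => td.modify i.toNat (· + 1))
          (List.replicate l.toNat (pvLoopA (t.toNat + 2) 1 l t - 1)) = _
      rw [hloop, hf0]
      rw [PySem.List.pyRange_neg_one_eq_nil (by omega)]
      simp only [List.foldl_nil]
      unfold make_todo_alt
      have hmax : max t 0 = 0 := by omega
      rw [hmax]
      simp [PySem.Int.floordiv, PySem.Int.mod, Int.zero_fdiv]
  · -- l < 0, t < l : both return []
    have h1 : ¬ (1 * l ≤ t) := by omega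
    have hloop : pvLoopA (t.toNat + 2) 1 l t = 1 := by
      simp only [pvLoopA]
      rw [if_neg h1]
    show (PySem.List.pyRange (l - 1) (l - 1 - (t - (pvLoopA (t.toNat + 2) 1 l t - 1) * l)) (-1)).foldl
        (fun td i => td.modify i.toNat (· + 1))
        (List.replicate l.toNat (pvLoopA (t.toNat + 2) 1 l t - 1)) = _
    rw [hloop]
    rw [PySem.List.pyRange_neg_one_eq_nil (by omega)]
    have hln : l.toNat = 0 := by omega
    simp only [List.foldl_nil, hln, List.replicate_zero]
    unfold make_todo_alt
    have hmax : max t 0 = 0 := by omega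
    rw [hmax]
    simp [PySem.Int.floordiv, PySem.Int.mod, Int.zero_fdiv]
    omega

-- ===== VERDICT (by name: the statement is the Claim_ definition above) =====
theorem make_todo_spec : Claim_equal_make_todo := by
  intro l t _ hpre
  exact make_todo_eq l t hpre
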